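-- pv_equiv track=rewrite | github.com/karstenpedersen/helpful | booths-algorithm.py | negate_twos_complement
-- ===== SOURCE A (Python) =====
-- def neg(b: str) -> str:
--     if b == "0":
--         return "1"
--
--     return "0"
--
-- def negate_twos_complement(x: str) -> str:
--     inverse = ""
--     found_one = False
--     for b in x[::-1]:
--         if found_one:
--             inverse += neg(b)
--         else:
--             if b == "1":
--                 found_one = True
--             inverse += b
--     return inverse[::-1]
-- ===== SOURCE B (Python) =====
-- def negate_twos_complement(x: str) -> str:
--     idx = x.rfind("1")
--     if idx == -1:
--         return x
--     return "".join("1" if c == "0" else "0" for c in x[:idx]) + x[idx:]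
-- ===== Notes on version B (the rewrite author's own statement) =====
-- stated objective: faster
-- what changed: Replaces A's reverse char-by-char scan with a found_one flag, per-char string concatenation and two string reversals by one C-level rfind pivot lookup followed by flipping the prefix and keeping the suffix; same O(n) but much lower constant.
import Mathlib
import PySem

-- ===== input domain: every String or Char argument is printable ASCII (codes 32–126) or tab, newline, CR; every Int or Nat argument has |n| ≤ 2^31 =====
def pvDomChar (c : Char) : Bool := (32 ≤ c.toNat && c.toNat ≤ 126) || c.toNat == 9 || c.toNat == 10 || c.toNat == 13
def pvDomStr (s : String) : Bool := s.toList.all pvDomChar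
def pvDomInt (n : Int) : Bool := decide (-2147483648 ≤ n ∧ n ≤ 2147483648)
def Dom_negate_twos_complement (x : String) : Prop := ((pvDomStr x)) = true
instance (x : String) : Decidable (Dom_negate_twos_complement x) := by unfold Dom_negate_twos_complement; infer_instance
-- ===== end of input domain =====

-- B replaces A's reverse scan with a found_one flag (and two reversals) by an rfind('1')
-- pivot lookup: flip the prefix before the last '1', keep the rest — objective: simpler.

-- ===== PORT A =====
def neg (b : String) : String := if b = "0" then "1" else "0"

-- loop body: if found_one: inverse += neg(b) else: (if b == "1": found_one = True); inverse += b
def pvStepA (acc : List Char × Bool) (b : Char) : List Char × Bool :=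
  let inverse := acc.1
  let found_one := acc.2
  if found_one then (inverse ++ (neg (String.ofList [b])).toList, found_one)
  else if String.ofList [b] = "1" then (inverse ++ [b], true)
  else (inverse ++ [b], found_one)

def negate_twos_complement (x : String) : String :=
  let r := x.toList.reverse                      -- for b in x[::-1]
  let st := r.foldl pvStepA ([], false)          -- inverse = "", found_one = False
  String.ofList st.1.reverse                     -- return inverse[::-1]

-- ===== PORT B =====
-- x.rfind("1") as an index into the char list (none = -1)
def rfindOne : List Char → Option Nat
  | [] => none
  | c :: cs =>
    match rfindOne cs with
    | some i => some (i + 1)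
    | none => if c = '1' then some 0 else none

def negate_twos_complement_alt (x : String) : String :=
  match rfindOne x.toList with
  | none => x
  | some idx =>
    String.ofList (((x.toList.take idx).map fun c => if c = '0' then '1' else '0') ++ x.toList.drop idx)

-- ===== PRECONDITION & SPEC =====
def Spec_negate_twos_complement (x : String) (out : String) : Prop := out = negate_twos_complement_alt x
instance (x : String) (out : String) : Decidable (Spec_negate_twos_complement x out) := by unfold Spec_negate_twos_complement; infer_instance

-- ===== CLAIM (what is proved, stated in full; the proofs are below) =====
def Claim_equal_negate_twos_complement : Prop := ∀ (x : String), Dom_negate_twos_complement x → Spec_negate_twos_complement x (negate_twos_complement x)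

-- ===== LEMMAS AND PROOFS =====

def pvFlip (c : Char) : Char := if c = '0' then '1' else '0'

-- structural form of A's loop over the reversed list
def pvG (fd : Bool) : List Char → List Char
  | [] => []
  | c :: rs =>
    if fd then pvFlip c :: pvG true rs
    else if c = '1' then c :: pvG true rs
    else c :: pvG false rs

lemma ofList_eq_lit (b c : Char) : (String.ofList [b] = String.ofList [c]) ↔ b = c := by
  constructor
  · intro hs
    have := congrArg String.toList hs
    simpa using this
  · intro h; subst h; rfl

lemma neg_toList (b : Char) : (neg (String.ofList [b])).toList = [pvFlip b] := by
  simp only [neg, pvFlip]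
  by_cases h : b = '0'
  · subst h; rfl
  · rw [if_neg (fun hs => h ((ofList_eq_lit b '0').mp hs)), if_neg h]; rfl

lemma pvStepA_true (inv : List Char) (b : Char) :
    pvStepA (inv, true) b = (inv ++ [pvFlip b], true) := by
  simp [pvStepA, neg_toList]

lemma pvStepA_false (inv : List Char) (b : Char) :
    pvStepA (inv, false) b = (inv ++ [b], decide (b = '1')) := by
  by_cases h : b = '1'
  · subst h; simp [pvStepA]
  · have hne : ¬ String.ofList [b] = "1" := fun hs => h ((ofList_eq_lit b '1').mp hs)
    simp [pvStepA, h, hne]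

lemma foldl_eq_pvG (rs : List Char) (acc : List Char) (fd : Bool) :
    (rs.foldl pvStepA (acc, fd)).1 = acc ++ pvG fd rs := by
  induction rs generalizing acc fd with
  | nil => simp [pvG]
  | cons c rs ih =>
    rw [List.foldl_cons]
    by_cases hfd : fd
    · subst hfd
      rw [pvStepA_true, ih]
      simp [pvG]
    · simp only [Bool.not_eq_true] at hfd; subst hfd
      rw [pvStepA_false, ih]
      by_cases h1 : c = '1'
      · subst h1; simp [pvG]
      · simp [pvG, h1]

lemma pvG_append (fd : Bool) (l1 l2 : List Char) :
    pvG fd (l1 ++ l2) = pvG fd l1 ++ pvG (fd || l1.any (· = '1')) l2 := by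
  induction l1 generalizing fd with
  | nil => simp [pvG]
  | cons c l1 ih =>
    by_cases hfd : fd
    · subst hfd; simp [pvG, ih]
    · simp only [Bool.not_eq_true] at hfd; subst hfd
      by_cases h1 : c = '1'
      · subst h1; simp [pvG, ih]
      · simp [pvG, h1, ih]

lemma rfindOne_none_iff (cs : List Char) : rfindOne cs = none ↔ '1' ∉ cs := by
  induction cs with
  | nil => simp [rfindOne]
  | cons c cs ih =>
    simp only [rfindOne, List.mem_cons]
    cases h : rfindOne cs with
    | some i =>
      constructor
      · intro hc; exact absurd hc (by simp)
      · intro hn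
        exact absurd (ih.mpr (fun hm => hn (Or.inr hm))) (by simp [h])
    | none =>
      by_cases h1 : c = '1'
      · subst h1; simp
      · simp only [if_neg h1]
        constructor
        · intro _
          rintro (hc | hm)
          · exact h1 hc.symm
          · exact ih.mp h hm
        · intro _; trivial

-- A on lists, defined directly
def pvA (cs : List Char) : List Char := (pvG false cs.reverse).reverse

lemma pvA_cons (c : Char) (cs : List Char) :
    pvA (c :: cs) = (if cs.any (· = '1') then pvFlip c else c) :: pvA cs := by
  simp only [pvA, List.reverse_cons, pvG_append, Bool.false_or, List.any_reverse]
  by_cases h : cs.any (· = '1')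
  · simp [h, pvG]
  · simp only [h, Bool.false_eq_true, if_false]
    by_cases h1 : c = '1'
    · subst h1; simp [pvG]
    · simp [pvG, h1]

-- B on lists
def pvB (cs : List Char) : List Char :=
  match rfindOne cs with
  | none => cs
  | some idx => (cs.take idx).map pvFlip ++ cs.drop idx

lemma pvA_no_one (cs : List Char) (h : '1' ∉ cs) : pvA cs = cs := by
  induction cs with
  | nil => rfl
  | cons c cs ih =>
    rw [pvA_cons]
    have hc : '1' ∉ cs := fun hm => h (List.mem_cons_of_mem _ hm)
    have hany : cs.any (· = '1') = false := by
      simp only [List.any_eq_false, decide_eq_true_eq]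
      intro a ha he; exact hc (he ▸ ha)
    rw [hany]
    simp [ih hc]

lemma pvA_eq_pvB (cs : List Char) : pvA cs = pvB cs := by
  induction cs with
  | nil => rfl
  | cons c cs ih =>
    rw [pvA_cons]
    cases h : rfindOne cs with
    | none =>
      have hno : '1' ∉ cs := (rfindOne_none_iff cs).mp h
      have hany : cs.any (· = '1') = false := by
        simp only [List.any_eq_false, decide_eq_true_eq]
        intro a ha he; exact hno (he ▸ ha)
      rw [hany]
      by_cases h1 : c = '1'
      · subst h1
        have hr : rfindOne ('1' :: cs) = some 0 := by simp [rfindOne, h]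
        simp [pvB, hr, pvA_no_one cs hno]
      · have hr : rfindOne (c :: cs) = none := by simp [rfindOne, h, h1]
        simp only [Bool.false_eq_true, if_false, pvB, hr]
        rw [pvA_no_one cs hno]
    | some i =>
      have hone : '1' ∈ cs := by
        by_contra hno
        rw [(rfindOne_none_iff cs).mpr hno] at h
        exact absurd h (by simp)
      have hany : cs.any (· = '1') = true := by
        simp only [List.any_eq_true]; exact ⟨'1', hone, by simp⟩
      rw [hany]
      have hr : rfindOne (c :: cs) = some (i + 1) := by simp [rfindOne, h]
      simp only [pvB, hr, List.take_succ_cons, List.drop_succ_cons, List.map_cons]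
      rw [ih]
      simp [pvB, h]

-- ===== VERDICT (by name: the statement is the Claim_ definition above) =====
theorem negate_twos_complement_spec : Claim_equal_negate_twos_complement := by
  intro x _
  unfold Spec_negate_twos_complement negate_twos_complement negate_twos_complement_alt
  simp only
  rw [foldl_eq_pvG, List.nil_append]
  have hAB := pvA_eq_pvB x.toList
  simp only [pvA, pvB] at hAB
  rw [hAB]
  have hflip : pvFlip = fun c : Char => if c = '0' then '1' else '0' := rfl
  cases h : rfindOne x.toList with
  | none => simp
  | some i => rw [hflip]
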